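-- pv_equiv track=rewrite | github.com/CemAlpturk/Advent-of-Code | 2023/6/solution.py | optimal_times
-- ===== SOURCE A (Python) =====
-- def optimal_times(time: int, best_distance: int) -> int:
--     count = 0
--     for t_press in range(1, time):
--         speed = t_press
--         dist = speed * (time - t_press)
--         if dist > best_distance:
--             count += 1
--
--     return count
-- ===== SOURCE B (Python) =====
-- def _isqrt(n):
--     # Newton's method floor square root (exact for n >= 1).
--     x = n
--     y = (x + n // x) // 2
--     while y < x:
--         x = y
--         y = (x + n // x) // 2
--     return x
--
--
-- def optimal_times(time: int, best_distance: int) -> int: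
--     # Count t in [1, time) with t*(time-t) > best_distance by solving the
--     # quadratic inequality: integers strictly between the roots of
--     # t^2 - time*t + best_distance, clamped to [1, time-1].
--     if time <= 1:
--         return 0
--     disc = time * time - 4 * best_distance
--     if disc <= 0:
--         return 0
--     s = _isqrt(disc)
--     lo = (time - s) // 2
--     if lo * (time - lo) <= best_distance:
--         lo += 1
--     return max(0, min(time - lo, time - 1) - max(lo, 1) + 1)
-- ===== Notes on version B (the rewrite author's own statement) =====
-- stated objective: faster
-- what changed: Replaces the O(time) scan over all press times by solving the quadratic inequality t*(time-t) > best_distance: an integer square root of the discriminant gives the root interval, and the answer is the clamped count of integers in it.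
import Mathlib
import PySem

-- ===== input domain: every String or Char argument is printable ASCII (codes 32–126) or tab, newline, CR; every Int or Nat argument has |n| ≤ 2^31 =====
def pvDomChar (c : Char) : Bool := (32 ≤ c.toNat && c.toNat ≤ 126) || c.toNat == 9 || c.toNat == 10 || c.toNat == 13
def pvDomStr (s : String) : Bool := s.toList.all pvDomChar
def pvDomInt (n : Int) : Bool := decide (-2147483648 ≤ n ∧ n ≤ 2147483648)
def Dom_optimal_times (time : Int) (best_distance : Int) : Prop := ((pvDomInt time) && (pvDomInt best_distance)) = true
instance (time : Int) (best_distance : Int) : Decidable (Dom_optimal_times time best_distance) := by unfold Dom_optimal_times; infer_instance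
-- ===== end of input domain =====

-- B replaces A's O(time) scan by solving the quadratic inequality t*(time-t) > best_distance
-- with an integer square root of the discriminant (objective: faster, asymptotic).

-- ===== PORT A =====
def optimal_times (time : Int) (best_distance : Int) : Int :=
  (PySem.List.pyRange 1 time 1).foldl (fun count t_press =>
    let speed := t_press
    let dist := speed * (time - t_press)
    if dist > best_distance then count + 1 else count) 0

-- ===== PORT B =====
-- Source B's _isqrt (Newton's method): ported over Nat — exact, since B only calls it on the
-- positive int disc, and Python's // on nonnegative ints is Nat division.
def isqrtIter (n x : Nat) : Nat :=
  let y := (x + n / x) / 2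
  if y < x then isqrtIter n y else x
termination_by x

def optimal_times_alt (time : Int) (best_distance : Int) : Int :=
  if time ≤ 1 then 0
  else
    let disc := time * time - 4 * best_distance
    if disc ≤ 0 then 0
    else
      let s : Int := (isqrtIter disc.toNat disc.toNat : Nat)
      let lo0 := PySem.Int.floordiv (time - s) 2
      let lo := if lo0 * (time - lo0) ≤ best_distance then lo0 + 1 else lo0
      max 0 (min (time - lo) (time - 1) - max lo 1 + 1)

-- ===== PRECONDITION & SPEC =====
def Spec_optimal_times (time : Int) (best_distance : Int) (out : Int) : Prop := out = optimal_times_alt time best_distance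
instance (time : Int) (best_distance : Int) (out : Int) : Decidable (Spec_optimal_times time best_distance out) := by unfold Spec_optimal_times; infer_instance

-- ===== CLAIM (what is proved, stated in full; the proofs are below) =====
def Claim_equal_optimal_times : Prop := ∀ (time : Int) (best_distance : Int), Dom_optimal_times time best_distance → Spec_optimal_times time best_distance (optimal_times time best_distance)

-- ===== LEMMAS AND PROOFS =====

-- Source B's Newton loop is the same iteration as core's Nat.sqrt.iter (different initial guess).
theorem isqrtIter_eq (n : Nat) : ∀ x, isqrtIter n x = Nat.sqrt.iter n x := by
  intro x
  induction x using Nat.strong_induction_on with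
  | _ x ih =>
    rw [isqrtIter, Nat.sqrt.iter]
    by_cases h : (x + n / x) / 2 < x
    · simp only [h, if_true, dif_pos]
      exact ih _ h
    · simp [h]

theorem isqrtIter_bounds (n : Nat) :
    isqrtIter n n * isqrtIter n n ≤ n ∧ n < (isqrtIter n n + 1) * (isqrtIter n n + 1) := by
  rw [isqrtIter_eq]
  exact ⟨Nat.sqrt.iter_sq_le n n, Nat.sqrt.lt_iter_succ_sq n n (by nlinarith)⟩

-- number of integers of [a, b) lying in [lo, hi]
theorem count_interval (lo hi a : Int) : ∀ (b : Int),
    (((PySem.List.pyRange a b 1).countP (fun t => decide (lo ≤ t ∧ t ≤ hi))) : Int)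
      = max 0 (min hi (b - 1) - max lo a + 1) := by
  intro b
  generalize hk : (b - a).toNat = k
  induction k generalizing b with
  | zero =>
    rw [PySem.List.pyRange_one_eq_nil (by omega)]
    simp; omega
  | succ k ih =>
    have hab : a ≤ b - 1 := by omega
    have hsplit : PySem.List.pyRange a b 1 = PySem.List.pyRange a (b - 1) 1 ++ [b - 1] := by
      have := PySem.List.pyRange_one_succ_right (a := a) (b := b - 1) hab
      simpa using this
    rw [hsplit, List.countP_append]
    have := ih (b - 1) (by omega)
    push_cast
    push_cast at this
    rw [this]
    simp only [List.countP_cons, List.countP_nil]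
    by_cases h : lo ≤ b - 1 ∧ b - 1 ≤ hi <;> simp [h] <;> omega

-- the press times beating best_distance are exactly the integers in [lo, time - lo]
theorem cond_iff (time best_distance s lo0 : Int)
    (hs0 : 0 ≤ s)
    (hs1 : s * s ≤ time * time - 4 * best_distance)
    (hs2 : time * time - 4 * best_distance < (s + 1) * (s + 1))
    (hL1 : 2 * lo0 ≤ time - s) (hL2 : time - s < 2 * lo0 + 2) (t : Int) :
    (best_distance < t * (time - t)) ↔
      ((if lo0 * (time - lo0) ≤ best_distance then lo0 + 1 else lo0) ≤ t ∧
       t ≤ time - (if lo0 * (time - lo0) ≤ best_distance then lo0 + 1 else lo0)) := by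
  split_ifs with hb
  · -- bump case: (2*lo0 - time)^2 ≥ disc
    constructor
    · intro hc
      constructor
      · by_contra hlt
        push Not at hlt
        rcases eq_or_lt_of_le (show t ≤ lo0 by omega) with heq | hlt2
        · subst heq; nlinarith
        · nlinarith [sq_nonneg (time - 2 * t), sq_nonneg (time - 2 * t - (s + 2))]
      · by_contra hlt
        push Not at hlt
        rcases eq_or_lt_of_le (show time - lo0 ≤ t by omega) with heq | hlt2
        · nlinarith
        · nlinarith [sq_nonneg (2 * t - time), sq_nonneg (2 * t - time - (s + 2))]
    · rintro ⟨h1, h2⟩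
      rcases eq_or_lt_of_le hs0 with hs | hs
      · omega
      · nlinarith [sq_nonneg (2 * t - time), sq_nonneg (s - 1 - (2 * t - time)), sq_nonneg (s - 1 + (2 * t - time))]
  · -- no bump: (2*lo0 - time)^2 < disc
    push Not at hb
    constructor
    · intro hc
      constructor
      · by_contra hlt
        push Not at hlt
        nlinarith [sq_nonneg (time - 2 * t), sq_nonneg (time - 2 * t - (s + 1))]
      · by_contra hlt
        push Not at hlt
        nlinarith [sq_nonneg (2 * t - time), sq_nonneg (2 * t - time - (s + 1))]
    · rintro ⟨h1, h2⟩
      nlinarith [sq_nonneg (2 * t - time), sq_nonneg (time - 2 * lo0 - (2 * t - time)), sq_nonneg (time - 2 * lo0 + (2 * t - time))]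

-- A's fold is a countP
theorem optA_eq_countP (time best_distance : Int) :
    optimal_times time best_distance
      = ((PySem.List.pyRange 1 time 1).countP (fun t => decide (best_distance < t * (time - t))) : Int) := by
  unfold optimal_times
  have h := PySem.List.foldl_count_if (fun t => decide (best_distance < t * (time - t)))
    (PySem.List.pyRange 1 time 1) 0
  simp only [decide_eq_true_eq] at h
  simpa using h

-- ===== VERDICT (by name: the statement is the Claim_ definition above) =====
theorem optimal_times_spec : Claim_equal_optimal_times := by
  intro time best_distance _
  unfold Spec_optimal_times optimal_times_alt
  rw [optA_eq_countP]
  by_cases h1 : time ≤ 1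
  · rw [PySem.List.pyRange_one_eq_nil (by omega)]
    simp [h1]
  · rw [if_neg h1]
    push Not at h1
    by_cases h2 : time * time - 4 * best_distance ≤ 0
    · rw [if_pos h2]
      have : (PySem.List.pyRange 1 time 1).countP (fun t => decide (best_distance < t * (time - t))) = 0 := by
        rw [List.countP_eq_zero]
        intro t _ hc
        simp only [decide_eq_true_eq] at hc
        nlinarith [sq_nonneg (2 * t - time)]
      rw [this]; rfl
    · rw [if_neg h2]
      push Not at h2
      set D : Int := time * time - 4 * best_distance with hD
      have hDt : (D.toNat : Int) = D := Int.toNat_of_nonneg (by omega)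
      obtain ⟨hb1, hb2⟩ := isqrtIter_bounds D.toNat
      set sN : Nat := isqrtIter D.toNat D.toNat with hsN
      have hs0 : (0 : Int) ≤ (sN : Int) := by positivity
      have hs1 : (sN : Int) * (sN : Int) ≤ D := by rw [← hDt]; exact_mod_cast hb1
      have hs2 : D < ((sN : Int) + 1) * ((sN : Int) + 1) := by rw [← hDt]; exact_mod_cast hb2
      set lo0 : Int := PySem.Int.floordiv (time - (sN : Int)) 2 with hlo0
      have hbr := (PySem.Int.floordiv_eq_iff_of_pos
        (a := time - (sN : Int)) (b := 2) (q := lo0) (by omega)).mp rfl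
      have hL1 : 2 * lo0 ≤ time - (sN : Int) := by omega
      have hL2 : time - (sN : Int) < 2 * lo0 + 2 := by omega
      have hcong : (PySem.List.pyRange 1 time 1).countP (fun t => decide (best_distance < t * (time - t)))
          = (PySem.List.pyRange 1 time 1).countP (fun t =>
              decide ((if lo0 * (time - lo0) ≤ best_distance then lo0 + 1 else lo0) ≤ t ∧
                t ≤ time - (if lo0 * (time - lo0) ≤ best_distance then lo0 + 1 else lo0))) := by
        apply List.countP_congr
        intro t _
        simp only [decide_eq_true_eq]
        exact cond_iff time best_distance (sN : Int) lo0 hs0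
          (by rw [← hD]; exact hs1) (by rw [← hD]; exact hs2) hL1 hL2 t
      rw [hcong]
      rw [count_interval]
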